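-- pv_equiv track=rewrite | github.com/mneuhaus/foe-be-gone | classify_animals_efficientnet.py | get_animal_group
-- ===== SOURCE A (Python) =====
-- def get_animal_group(class_name, class_id):
--     """Map ImageNet class to broader animal groups relevant to wildlife surveillance"""
--     class_name = class_name.lower()
--
--     # Birds (corvids and related)
--     if any(bird in class_name for bird in ['crow', 'raven', 'magpie', 'jay', 'jackdaw']):
--         return "corvid"
--     elif any(bird in class_name for bird in ['robin', 'finch', 'bunting', 'chickadee', 'sparrow']):
--         return "small_bird"
--     elif any(bird in class_name for bird in ['hawk', 'eagle', 'vulture', 'owl', 'kite']):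
--         return "raptor"
--     elif any(bird in class_name for bird in ['duck', 'goose', 'swan', 'drake']):
--         return "waterfowl"
--     elif class_id in range(7, 146):  # Most birds in ImageNet are in this range
--         return "bird"
--
--     # Mammals - cats
--     elif any(cat in class_name for cat in ['cat', 'cougar', 'lynx', 'leopard', 'jaguar', 'lion', 'tiger', 'cheetah']):
--         return "feline"
--
--     # Mammals - dogs/canines
--     elif any(dog in class_name for dog in ['dog', 'wolf', 'coyote', 'fox', 'dingo']):
--         return "canine"
--
--     # Rodents
--     elif any(rodent in class_name for rodent in ['squirrel', 'rabbit', 'hare', 'hamster', 'guinea_pig', 'beaver']):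
--         return "rodent"
--
--     # Large mammals
--     elif any(large in class_name for large in ['bear', 'deer', 'elk', 'moose', 'bison', 'buffalo']):
--         return "large_mammal"
--
--     # Small mammals
--     elif any(small in class_name for small in ['weasel', 'mink', 'ferret', 'otter', 'skunk', 'badger']):
--         return "small_mammal"
--
--     # Default classification
--     elif class_id in range(7, 146):
--         return "bird"
--     elif class_id in range(151, 398):
--         return "mammal"
--     else:
--         return "unknown"
-- ===== SOURCE B (Python) =====
-- # B: collect ALL matching candidates with priority ranks, then return the min-rank one
-- # (min-over-candidates instead of a first-match if/elif ladder).
-- _KW_GROUPS = [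
--     (0, ('crow', 'raven', 'magpie', 'jay', 'jackdaw'), 'corvid'),
--     (1, ('robin', 'finch', 'bunting', 'chickadee', 'sparrow'), 'small_bird'),
--     (2, ('hawk', 'eagle', 'vulture', 'owl', 'kite'), 'raptor'),
--     (3, ('duck', 'goose', 'swan', 'drake'), 'waterfowl'),
--     (5, ('cat', 'cougar', 'lynx', 'leopard', 'jaguar', 'lion', 'tiger', 'cheetah'), 'feline'),
--     (6, ('dog', 'wolf', 'coyote', 'fox', 'dingo'), 'canine'),
--     (7, ('squirrel', 'rabbit', 'hare', 'hamster', 'guinea_pig', 'beaver'), 'rodent'),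
--     (8, ('bear', 'deer', 'elk', 'moose', 'bison', 'buffalo'), 'large_mammal'),
--     (9, ('weasel', 'mink', 'ferret', 'otter', 'skunk', 'badger'), 'small_mammal'),
-- ]
-- _RANGE_GROUPS = [
--     (4, range(7, 146), 'bird'),
--     (10, range(151, 398), 'mammal'),
-- ]
--
-- def get_animal_group(class_name, class_id):
--     name = class_name.lower()
--     candidates = [(rank, grp) for rank, kws, grp in _KW_GROUPS
--                   if any(k in name for k in kws)]
--     candidates += [(rank, grp) for rank, rng, grp in _RANGE_GROUPS
--                    if class_id in rng]
--     return min(candidates, default=(99, 'unknown'))[1]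
-- ===== Notes on version B (the rewrite author's own statement) =====
-- stated objective: alternative
-- what changed: Instead of A's first-match if/elif ladder, B collects ALL matching (rank, group) candidates from keyword groups and id ranges and returns the minimum-rank candidate (min with a default for no match); the unreachable duplicate bird range disappears naturally.
import Mathlib
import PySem

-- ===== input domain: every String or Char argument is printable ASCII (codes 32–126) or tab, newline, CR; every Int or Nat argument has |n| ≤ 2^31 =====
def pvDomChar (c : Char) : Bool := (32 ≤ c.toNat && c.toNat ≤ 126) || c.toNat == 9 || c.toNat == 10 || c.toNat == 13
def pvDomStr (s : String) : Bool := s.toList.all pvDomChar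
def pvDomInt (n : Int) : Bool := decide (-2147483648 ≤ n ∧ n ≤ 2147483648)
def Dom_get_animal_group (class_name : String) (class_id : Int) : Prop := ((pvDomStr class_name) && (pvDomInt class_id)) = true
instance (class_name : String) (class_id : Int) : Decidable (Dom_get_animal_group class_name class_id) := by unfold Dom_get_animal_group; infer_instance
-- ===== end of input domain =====

-- B collects all matching (rank, group) candidates and returns the minimum-rank one,
-- instead of A's first-match if/elif ladder (objective: alternative algorithm, same cost).
-- ===== PORT A =====
def get_animal_group (class_name : String) (class_id : Int) : String :=
  let name := PySem.Str.lower class_name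
  if ["crow", "raven", "magpie", "jay", "jackdaw"].any (fun bird => PySem.Str.isIn bird name) then
    "corvid"
  else if ["robin", "finch", "bunting", "chickadee", "sparrow"].any (fun bird => PySem.Str.isIn bird name) then
    "small_bird"
  else if ["hawk", "eagle", "vulture", "owl", "kite"].any (fun bird => PySem.Str.isIn bird name) then
    "raptor"
  else if ["duck", "goose", "swan", "drake"].any (fun bird => PySem.Str.isIn bird name) then
    "waterfowl"
  else if 7 ≤ class_id ∧ class_id < 146 then
    "bird"
  else if ["cat", "cougar", "lynx", "leopard", "jaguar", "lion", "tiger", "cheetah"].any (fun cat => PySem.Str.isIn cat name) then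
    "feline"
  else if ["dog", "wolf", "coyote", "fox", "dingo"].any (fun dog => PySem.Str.isIn dog name) then
    "canine"
  else if ["squirrel", "rabbit", "hare", "hamster", "guinea_pig", "beaver"].any (fun rodent => PySem.Str.isIn rodent name) then
    "rodent"
  else if ["bear", "deer", "elk", "moose", "bison", "buffalo"].any (fun large => PySem.Str.isIn large name) then
    "large_mammal"
  else if ["weasel", "mink", "ferret", "otter", "skunk", "badger"].any (fun small => PySem.Str.isIn small name) then
    "small_mammal"
  else if 7 ≤ class_id ∧ class_id < 146 then
    "bird"
  else if 151 ≤ class_id ∧ class_id < 398 then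
    "mammal"
  else
    "unknown"

-- ===== PORT B =====
def pvKwGroups : List (Int × List String × String) :=
  [ (0, ["crow", "raven", "magpie", "jay", "jackdaw"], "corvid"),
    (1, ["robin", "finch", "bunting", "chickadee", "sparrow"], "small_bird"),
    (2, ["hawk", "eagle", "vulture", "owl", "kite"], "raptor"),
    (3, ["duck", "goose", "swan", "drake"], "waterfowl"),
    (5, ["cat", "cougar", "lynx", "leopard", "jaguar", "lion", "tiger", "cheetah"], "feline"),
    (6, ["dog", "wolf", "coyote", "fox", "dingo"], "canine"),
    (7, ["squirrel", "rabbit", "hare", "hamster", "guinea_pig", "beaver"], "rodent"),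
    (8, ["bear", "deer", "elk", "moose", "bison", "buffalo"], "large_mammal"),
    (9, ["weasel", "mink", "ferret", "otter", "skunk", "badger"], "small_mammal") ]

def pvRangeGroups : List (Int × (Int × Int) × String) :=
  [ (4, (7, 146), "bird"),
    (10, (151, 398), "mammal") ]

-- Python's min over (int, str) tuples, first minimal kept; `default=` for the empty list.
def pvMin (xs : List (Int × String)) (dflt : Int × String) : Int × String :=
  match xs with
  | [] => dflt
  | h :: t => t.foldl (fun best x =>
      if x.1 < best.1 ∨ (x.1 = best.1 ∧ x.2 < best.2) then x else best) h

def get_animal_group_alt (class_name : String) (class_id : Int) : String :=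
  let name := PySem.Str.lower class_name
  let candidates :=
    (pvKwGroups.filter (fun g => g.2.1.any (fun k => PySem.Str.isIn k name))).map
      (fun g => (g.1, g.2.2))
    ++ (pvRangeGroups.filter (fun g => decide (g.2.1.1 ≤ class_id ∧ class_id < g.2.1.2))).map
      (fun g => (g.1, g.2.2))
  (pvMin candidates (99, "unknown")).2

-- ===== PRECONDITION & SPEC =====
def Spec_get_animal_group (class_name : String) (class_id : Int) (out : String) : Prop := out = get_animal_group_alt class_name class_id
instance (class_name : String) (class_id : Int) (out : String) : Decidable (Spec_get_animal_group class_name class_id out) := by unfold Spec_get_animal_group; infer_instance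

-- ===== CLAIM (what is proved, stated in full; the proofs are below) =====
def Claim_equal_get_animal_group : Prop := ∀ (class_name : String) (class_id : Int), Dom_get_animal_group class_name class_id → Spec_get_animal_group class_name class_id (get_animal_group class_name class_id)

-- ===== LEMMAS AND PROOFS =====

-- ===== VERDICT (by name: the statement is the Claim_ definition above) =====
theorem get_animal_group_spec : Claim_equal_get_animal_group := by
  intro class_name class_id _
  unfold Spec_get_animal_group get_animal_group get_animal_group_alt
  simp only [pvKwGroups, pvRangeGroups, List.filter]
  generalize PySem.Str.lower class_name = nm
  generalize (["crow", "raven", "magpie", "jay", "jackdaw"].any (fun k => PySem.Str.isIn k nm)) = b0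
  generalize (["robin", "finch", "bunting", "chickadee", "sparrow"].any (fun k => PySem.Str.isIn k nm)) = b1
  generalize (["hawk", "eagle", "vulture", "owl", "kite"].any (fun k => PySem.Str.isIn k nm)) = b2
  generalize (["duck", "goose", "swan", "drake"].any (fun k => PySem.Str.isIn k nm)) = b3
  generalize (["cat", "cougar", "lynx", "leopard", "jaguar", "lion", "tiger", "cheetah"].any (fun k => PySem.Str.isIn k nm)) = b4
  generalize (["dog", "wolf", "coyote", "fox", "dingo"].any (fun k => PySem.Str.isIn k nm)) = b5
  generalize (["squirrel", "rabbit", "hare", "hamster", "guinea_pig", "beaver"].any (fun k => PySem.Str.isIn k nm)) = b6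
  generalize (["bear", "deer", "elk", "moose", "bison", "buffalo"].any (fun k => PySem.Str.isIn k nm)) = b7
  generalize (["weasel", "mink", "ferret", "otter", "skunk", "badger"].any (fun k => PySem.Str.isIn k nm)) = b8
  by_cases h1 : 7 ≤ class_id ∧ class_id < 146 <;>
    by_cases h2 : 151 ≤ class_id ∧ class_id < 398 <;>
    simp only [h1, h2, if_neg, not_false_iff, decide_false] <;>
    revert b0 b1 b2 b3 b4 b5 b6 b7 b8 <;> decide
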